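-- pv_equiv track=rewrite | github.com/sirajhahmadnazeer123/Owlcoder | hashmapanagaram.py | return_hash
-- ===== SOURCE A (Python) =====
-- def return_hash(s,t):
--     d={}
--     h={}
--     for i in s:
--         if i in d:
--             d[i]+=1
--         else:
--             d[i]=1
--     for i in t:
--         if i in h:
--             h[i]+=1
--         else:
--             h[i]=1
--     c=0
--     for key in d:
--         if key in h:
--             if d[key]>h[key]:
--                 c+=d[key]-h[key]
--         else:
--             c+=d[key]
--     return c
-- ===== SOURCE B (Python) =====
-- def return_hash(s, t):
--     ls = list(s)
--     for c in t:
--         if c in ls: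
--             ls.remove(c)
--     return len(ls)
-- ===== Notes on version B (the rewrite author's own statement) =====
-- stated objective: alternative
-- what changed: Instead of building two frequency dicts and comparing counts, B cancels characters directly: it walks t and removes one matching occurrence from the remaining list of s's characters, returning the number of characters of s left unmatched.
import Mathlib
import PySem

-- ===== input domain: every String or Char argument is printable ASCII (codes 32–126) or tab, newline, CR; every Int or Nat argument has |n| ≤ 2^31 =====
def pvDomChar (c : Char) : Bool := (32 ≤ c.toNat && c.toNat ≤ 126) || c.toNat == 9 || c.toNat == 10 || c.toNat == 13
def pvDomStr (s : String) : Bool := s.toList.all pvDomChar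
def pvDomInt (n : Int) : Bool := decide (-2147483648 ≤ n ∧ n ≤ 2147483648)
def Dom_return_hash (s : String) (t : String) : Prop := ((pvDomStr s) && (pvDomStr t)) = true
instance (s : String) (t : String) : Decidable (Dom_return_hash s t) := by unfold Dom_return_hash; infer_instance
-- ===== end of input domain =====

-- B replaces A's frequency-dict counting and surplus-comparison loops by direct cancellation:
-- walk t, remove one matching occurrence from the remaining characters of s, return what is left (alternative, not faster).


-- ===== PORT A =====
def return_hash (s : String) (t : String) : Int :=
  let d := s.toList.foldl (fun d i =>
      if d.contains i then d.insert i (d.getD i 0 + 1) else d.insert i 1)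
    (PySem.Dict.empty : PySem.Dict Char Int)
  let h := t.toList.foldl (fun h i =>
      if h.contains i then h.insert i (h.getD i 0 + 1) else h.insert i 1)
    (PySem.Dict.empty : PySem.Dict Char Int)
  d.keys.foldl (fun c key =>
      if h.contains key then
        if d.getD key 0 > h.getD key 0 then c + (d.getD key 0 - h.getD key 0) else c
      else c + d.getD key 0) 0

-- ===== PORT B =====
def return_hash_alt (s : String) (t : String) : Int :=
  let ls := t.toList.foldl (fun ls c =>
      if ls.contains c then (PySem.List.remove? ls c).getD ls else ls) s.toList
  (ls.length : Int)

-- ===== PRECONDITION & SPEC =====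
def Spec_return_hash (s : String) (t : String) (out : Int) : Prop := out = return_hash_alt s t
instance (s : String) (t : String) (out : Int) : Decidable (Spec_return_hash s t out) := by unfold Spec_return_hash; infer_instance

-- ===== CLAIM (what is proved, stated in full; the proofs are below) =====
def Claim_equal_return_hash : Prop := ∀ (s : String) (t : String), Dom_return_hash s t → Spec_return_hash s t (return_hash s t)

-- ===== LEMMAS AND PROOFS =====

-- A's counting loop (with an explicit membership branch) builds exactly Counter(l).
lemma count_loop_eq_counter (l : List Char) :
    l.foldl (fun d i =>
        if d.contains i then d.insert i (d.getD i 0 + 1) else d.insert i 1)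
      (PySem.Dict.empty : PySem.Dict Char Int) = PySem.Dict.counter l := by
  have hstep : (fun (d : PySem.Dict Char Int) i =>
      if d.contains i then d.insert i (d.getD i 0 + 1) else d.insert i 1)
      = fun d i => d.insert i (d.getD i 0 + 1) := by
    funext d i
    by_cases hc : d.contains i
    · simp [hc]
    · rw [if_neg hc, PySem.Dict.getD_of_not_contains d 0 (Bool.eq_false_iff.mpr hc), zero_add]
  rw [hstep]
  exact PySem.Dict.foldl_insert_getD_add_one_eq_counter l

-- general: sum of a pointwise difference
lemma sum_map_sub_int (l : List Char) (f g : Char → Int) :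
    (l.map fun x => f x - g x).sum = (l.map f).sum - (l.map g).sum := by
  induction l with
  | nil => simp
  | cons a l ih => simp [ih]; ring

-- summing the counts of the distinct characters of l recovers l's length
lemma sum_counts_ofList (l : List Char) :
    ((PySem.Set.ofList l).map fun k => (l.count k : Int)).sum = (l.length : Int) := by
  have hperm : (PySem.Set.ofList l : List Char).Perm l.dedup := by
    rw [List.perm_ext_iff_of_nodup (PySem.Set.nodup_ofList l) l.nodup_dedup]
    intro a
    simp [PySem.Set.mem_ofList, List.mem_dedup]
  have hcast : ∀ (m : List Char), (m.map fun k => (l.count k : Int)).sum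
      = ((m.map fun k => l.count k).sum : Int) := by
    intro m; push_cast; rw [List.map_map]; rfl
  rw [(hperm.map fun k => (l.count k : Int)).sum_eq, hcast,
    List.sum_map_count_dedup_eq_length]

-- A's surplus at one character equals count_s minus the overlap
lemma surplus_eq (cs ct : List Char) (k : Char) :
    (if ct.contains k then
        if (cs.count k : Int) > (ct.count k : Int)
        then (cs.count k : Int) - (ct.count k : Int) else 0
      else (cs.count k : Int))
    = (cs.count k : Int) - min (cs.count k : Int) (ct.count k : Int) := by
  by_cases hm : ct.contains k
  · rw [if_pos hm]; split_ifs <;> omega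
  · have h0 : ct.count k = 0 :=
      List.count_eq_zero.mpr (fun hk => hm (List.contains_iff_mem.mpr hk))
    rw [if_neg hm, h0]; push_cast; omega

-- A equals length(s) minus the overlap sum
lemma A_eq_closed (s t : String) :
    return_hash s t
      = (s.toList.length : Int) -
        ((PySem.Set.ofList s.toList).map
          (fun c => min (s.toList.count c : Int) (t.toList.count c : Int))).sum := by
  unfold return_hash
  rw [count_loop_eq_counter s.toList, count_loop_eq_counter t.toList]
  dsimp only
  rw [PySem.Dict.keys_counter]
  set cs := s.toList
  set ct := t.toList
  have hbody : (fun (c : Int) key =>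
      if (PySem.Dict.counter ct).contains key then
        if (PySem.Dict.counter cs).getD key 0 > (PySem.Dict.counter ct).getD key 0
        then c + ((PySem.Dict.counter cs).getD key 0 - (PySem.Dict.counter ct).getD key 0)
        else c
      else c + (PySem.Dict.counter cs).getD key 0)
      = fun c key => c + ((cs.count key : Int) - min (cs.count key : Int) (ct.count key : Int)) := by
    funext c key
    rw [PySem.Dict.contains_counter, PySem.Dict.getD_counter, PySem.Dict.getD_counter]
    rw [← surplus_eq cs ct key]
    split_ifs <;> omega
  rw [hbody, PySem.List.foldl_add, sum_map_sub_int, sum_counts_ofList]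
  ring

-- B's cancellation step, written with erase
lemma step_eq_erase (ls : List Char) (c : Char) :
    (if ls.contains c then (PySem.List.remove? ls c).getD ls else ls)
      = if ls.contains c then ls.erase c else ls := by
  by_cases hc : ls.contains c
  · rw [if_pos hc, if_pos hc,
      PySem.List.remove?_eq_some_erase ls c (List.contains_iff_mem.mp hc), Option.getD_some]
  · rw [if_neg hc, if_neg hc]

-- count invariant of B's fold: each character of s is cancelled min(count_s, count_t) times
lemma count_fold (ct : List Char) (ls : List Char) (k : Char) :
    (ct.foldl (fun ls c => if ls.contains c then ls.erase c else ls) ls).count k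
      = ls.count k - min (ls.count k) (ct.count k) := by
  induction ct generalizing ls with
  | nil => simp
  | cons c rest ih =>
    simp only [List.foldl_cons]
    rw [ih]
    by_cases hc : ls.contains c
    · rw [if_pos hc]
      have hcpos : 0 < ls.count c := List.count_pos_iff.mpr (List.contains_iff_mem.mp hc)
      by_cases hk : k = c
      · subst hk
        rw [List.count_erase_self, List.count_cons_self]
        omega
      · rw [List.count_erase_of_ne hk, List.count_cons_of_ne (Ne.symm hk)]
    · rw [if_neg hc]
      have h0 : ls.count c = 0 :=
        List.count_eq_zero.mpr (fun h => hc (List.contains_iff_mem.mpr h))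
      by_cases hk : k = c
      · subst hk; rw [List.count_cons_self]; omega
      · rw [List.count_cons_of_ne (Ne.symm hk)]

-- summing an indicator over a duplicate-free list containing a gives 1
lemma sum_indicator (S : List Char) (a : Char) (hN : S.Nodup) (ha : a ∈ S) :
    (S.map (fun x => if a = x then (1 : ℕ) else 0)).sum = 1 := by
  induction S with
  | nil => cases ha
  | cons b S ih =>
    simp only [List.map_cons, List.sum_cons]
    rcases List.mem_cons.mp ha with h | h
    · subst h
      have hz : ∀ x ∈ S, (if a = x then (1:ℕ) else 0) = 0 := by
        intro x hx
        have : a ≠ x := fun he => (List.nodup_cons.mp hN).1 (he ▸ hx)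
        simp [this]
      rw [if_pos rfl, List.sum_eq_zero (by simpa using hz)]
      omega
    · have hba : a ≠ b := fun he => (List.nodup_cons.mp hN).1 (he ▸ h)
      rw [if_neg hba, ih (List.nodup_cons.mp hN).2 h, zero_add]

-- the length of a list is the sum of its counts over any duplicate-free superset of its elements
lemma length_eq_sum_counts (l S : List Char) (hN : S.Nodup) (hsub : ∀ x ∈ l, x ∈ S) :
    (S.map (fun k => l.count k)).sum = l.length := by
  induction l with
  | nil => simp
  | cons a l ih =>
    have h1 : (S.map fun k => (a :: l).count k)
        = S.map (fun k => l.count k + (if a = k then 1 else 0)) := by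
      apply List.map_congr_left; intro k _
      simp [List.count_cons, beq_iff_eq]
    rw [h1, List.sum_map_add, ih (fun x hx => hsub x (List.mem_cons_of_mem a hx)),
      sum_indicator S a hN (hsub a List.mem_cons_self), List.length_cons]

-- B equals length(s) minus the overlap sum
lemma B_eq_closed (s t : String) :
    return_hash_alt s t
      = (s.toList.length : Int) -
        ((PySem.Set.ofList s.toList).map
          (fun c => min (s.toList.count c : Int) (t.toList.count c : Int))).sum := by
  unfold return_hash_alt
  have hstep : (fun (ls : List Char) c =>
      if ls.contains c then (PySem.List.remove? ls c).getD ls else ls)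
      = fun ls c => if ls.contains c then ls.erase c else ls := by
    funext ls c; exact step_eq_erase ls c
  rw [hstep]
  set cs := s.toList
  set ct := t.toList
  set fin := ct.foldl (fun ls c => if ls.contains c then ls.erase c else ls) cs with hfin
  have hcount : ∀ k, fin.count k = cs.count k - min (cs.count k) (ct.count k) :=
    fun k => count_fold ct cs k
  have hsubS : ∀ x ∈ fin, x ∈ (PySem.Set.ofList cs : List Char) := by
    intro x hx
    have h1 : 0 < fin.count x := List.count_pos_iff.mpr hx
    rw [hcount x] at h1
    have h2 : 0 < cs.count x := by omega
    exact (PySem.Set.mem_ofList cs x).mpr (List.count_pos_iff.mp h2)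
  have hlen : ((PySem.Set.ofList cs : List Char).map (fun k => fin.count k)).sum = fin.length :=
    length_eq_sum_counts fin _ (PySem.Set.nodup_ofList cs) hsubS
  have hmapint : ((PySem.Set.ofList cs : List Char).map
        (fun k => (fin.count k : Int))).sum = (fin.length : Int) := by
    rw [← hlen]; push_cast; rw [List.map_map]; rfl
  have hpt : ((PySem.Set.ofList cs : List Char).map (fun k => (fin.count k : Int)))
      = (PySem.Set.ofList cs : List Char).map
          (fun k => (cs.count k : Int) - min (cs.count k : Int) (ct.count k : Int)) := by
    apply List.map_congr_left; intro k _
    rw [hcount k]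
    have hmle : min (cs.count k) (ct.count k) ≤ cs.count k := Nat.min_le_left _ _
    rw [Nat.cast_sub hmle]
    push_cast
    omega
  rw [← hmapint, hpt, sum_map_sub_int, sum_counts_ofList]

-- ===== VERDICT (by name: the statement is the Claim_ definition above) =====
theorem return_hash_spec : Claim_equal_return_hash := by
  intro s t _
  show return_hash s t = return_hash_alt s t
  rw [A_eq_closed, B_eq_closed]
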